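-- pv_equiv track=rewrite | github.com/saryal07/search-engine | search.py | key_by_author
-- ===== SOURCE A (Python) =====
-- def key_by_author(article_titles, title_to_info):
--     my_dictionary = {}
--     if title_to_info == {}:
--         return {}
--     else:
--         for article in article_titles:
--             if title_to_info[article]['author'] not in my_dictionary:
--                 my_dictionary[title_to_info[article]['author']] = [article]
--             else:
--                 my_dictionary[title_to_info[article]['author']].append(article)
--
--     return my_dictionary
-- ===== SOURCE B (Python) =====
-- def key_by_author(article_titles, title_to_info):
--     if title_to_info == {}:
--         return {}
--     authors = [title_to_info[t]['author'] for t in article_titles]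
--     return {a: [t for t, x in zip(article_titles, authors) if x == a]
--             for a in dict.fromkeys(authors)}
-- ===== Notes on version B (the rewrite author's own statement) =====
-- stated objective: alternative
-- what changed: Replaces A's single pass that mutates a dict (membership test, then insert-or-append per title) with a two-pass comprehension: map every title to its author, deduplicate the authors keeping first occurrences (dict.fromkeys), and build each author's title list by one filter over the zipped title/author pairs.
import Mathlib
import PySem

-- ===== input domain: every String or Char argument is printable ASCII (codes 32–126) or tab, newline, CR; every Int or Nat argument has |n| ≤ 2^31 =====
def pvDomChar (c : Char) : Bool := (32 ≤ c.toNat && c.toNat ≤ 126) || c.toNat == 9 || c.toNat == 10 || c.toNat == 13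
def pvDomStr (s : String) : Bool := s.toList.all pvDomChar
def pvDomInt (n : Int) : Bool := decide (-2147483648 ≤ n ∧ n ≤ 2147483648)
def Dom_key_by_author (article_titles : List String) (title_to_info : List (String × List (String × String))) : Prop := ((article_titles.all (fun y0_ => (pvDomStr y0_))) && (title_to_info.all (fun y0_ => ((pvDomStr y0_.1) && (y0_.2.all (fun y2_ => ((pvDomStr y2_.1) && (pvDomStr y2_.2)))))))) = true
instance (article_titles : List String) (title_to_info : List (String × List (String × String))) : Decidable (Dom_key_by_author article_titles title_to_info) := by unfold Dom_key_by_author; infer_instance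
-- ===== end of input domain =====

-- B groups titles by author via a two-pass comprehension (author list + per-author filter over
-- first-occurrence-deduplicated authors) instead of A's single pass mutating a dict; objective: alternative.


-- ===== PORT A =====
-- title_to_info[t]['author']; the defaults stand in for KeyError, which Pre_ excludes
def pvAuthor (title_to_info : List (String × List (String × String))) (t : String) : String :=
  (PySem.Dict.mk ((PySem.Dict.mk title_to_info).getD t [])).getD "author" ""

def key_by_author (article_titles : List String) (title_to_info : List (String × List (String × String))) : List (String × List String) :=
  if title_to_info = [] then []
  else
    (article_titles.foldl (fun d article =>
      if d.contains (pvAuthor title_to_info article) = false then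
        d.insert (pvAuthor title_to_info article) [article]
      else
        d.modify (pvAuthor title_to_info article) [] (fun xs => xs ++ [article]))
      PySem.Dict.empty).items

-- ===== PORT B =====
def key_by_author_alt (article_titles : List String) (title_to_info : List (String × List (String × String))) : List (String × List String) :=
  if title_to_info = [] then []
  else
    let authors := article_titles.map (fun t => pvAuthor title_to_info t)
    (PySem.List.dedup authors).map (fun a =>
      (a, ((article_titles.zip authors).filter (fun p => p.2 == a)).map (fun p => p.1)))

-- ===== PRECONDITION & SPEC =====
-- Excluded: exactly the inputs where Python A raises KeyError — a nonempty title_to_info with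
-- some listed title missing from it, or whose info lacks an 'author' key.
def Pre_key_by_author (article_titles : List String) (title_to_info : List (String × List (String × String))) : Prop :=
  title_to_info = [] ∨ ∀ t ∈ article_titles,
    (((PySem.Dict.mk title_to_info).get? t).elim false
      (fun m => (PySem.Dict.mk m).contains "author")) = true

instance (article_titles : List String) (title_to_info : List (String × List (String × String))) : Decidable (Pre_key_by_author article_titles title_to_info) := by unfold Pre_key_by_author; infer_instance

def pvWitness_key_by_author : List String × (List (String × List (String × String))) :=
  (["t1", "t2", "t1"], [("t1", [("author", "ann")]), ("t2", [("author", "bob")])])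

def Spec_key_by_author (article_titles : List String) (title_to_info : List (String × List (String × String))) (out : List (String × List String)) : Prop := out = key_by_author_alt article_titles title_to_info
instance (article_titles : List String) (title_to_info : List (String × List (String × String))) (out : List (String × List String)) : Decidable (Spec_key_by_author article_titles title_to_info out) := by unfold Spec_key_by_author; infer_instance

-- ===== CLAIM (what is proved, stated in full; the proofs are below) =====
def Claim_equal_key_by_author : Prop := ∀ (article_titles : List String) (title_to_info : List (String × List (String × String))), Dom_key_by_author article_titles title_to_info → Pre_key_by_author article_titles title_to_info → Spec_key_by_author article_titles title_to_info (key_by_author article_titles title_to_info)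

-- ===== LEMMAS AND PROOFS =====

-- the grouped table B builds, as a function of the title list
def pvGroup (f : String → String) (l : List String) : List (String × List String) :=
  (PySem.Set.ofList (l.map f)).map (fun a => (a, l.filter (fun t => f t == a)))

lemma pvZipFilter (f : String → String) (a : String) : ∀ (l : List String),
    ((l.zip (l.map f)).filter (fun p => p.2 == a)).map (fun p => p.1)
      = l.filter (fun t => f t == a) := by
  intro l
  induction l with
  | nil => rfl
  | cons x xs ih =>
    simp only [List.map_cons, List.zip_cons_cons, List.filter_cons]
    by_cases h : f x = a
    · simp [h, ih]
    · simp [h, ih]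

lemma pvContainsGroup (f : String → String) (l : List String) (k : String) :
    (PySem.Dict.mk (pvGroup f l)).contains k = true ↔ k ∈ l.map f := by
  simp only [PySem.Dict.contains, pvGroup, List.any_map]
  simp [List.any_eq_true, Function.comp, PySem.Set.mem_ofList]

lemma pvGetGroup (f : String → String) (l : List String) (k : String) (hk : k ∈ l.map f) :
    (PySem.Dict.mk (pvGroup f l)).get? k = some (l.filter (fun t => f t == k)) := by
  apply PySem.Dict.get?_of_mem_items
  · show _ ∈ pvGroup f l
    unfold pvGroup
    exact List.mem_map_of_mem ((PySem.Set.mem_ofList _ _).2 hk)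
  · simp only [PySem.Dict.keys, pvGroup, List.map_map]
    have h1 : ((fun x : String × List String => x.1) ∘ fun a => (a, l.filter (fun t => f t == a)))
        = fun a => a := rfl
    rw [h1]
    simp only [List.map_id_fun']
    exact PySem.Set.nodup_ofList (l.map f)

lemma pvOfListSnoc (xs : List String) (x : String) :
    PySem.Set.ofList (xs ++ [x])
      = if x ∈ xs then PySem.Set.ofList xs else PySem.Set.ofList xs ++ [x] := by
  rw [PySem.Set.ofList_eq_foldl, List.foldl_append, ← PySem.Set.ofList_eq_foldl]
  by_cases h : x ∈ xs <;>
    simp [PySem.Set.add, PySem.Set.contains, PySem.Set.mem_ofList, h]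

-- A's dict-building loop over any title list produces exactly B's grouped table
lemma pvFoldlGroup (f : String → String) : ∀ (l : List String),
    (l.foldl (fun d article =>
        if d.contains (f article) = false then d.insert (f article) [article]
        else d.modify (f article) [] (fun xs => xs ++ [article])) PySem.Dict.empty)
      = PySem.Dict.mk (pvGroup f l) := by
  intro l
  induction l using List.reverseRecOn with
  | nil => rfl
  | append_singleton l t ih =>
    rw [List.foldl_append, List.foldl_cons, List.foldl_nil, ih]
    by_cases hmem : f t ∈ l.map f
    · -- author already present: the loop appends to the existing entry
      have hc : (PySem.Dict.mk (pvGroup f l)).contains (f t) = true :=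
        (pvContainsGroup f l (f t)).2 hmem
      rw [hc]
      simp only [Bool.true_eq_false, if_false, PySem.Dict.modify, PySem.Dict.getD,
        pvGetGroup f l (f t) hmem, Option.getD_some]
      apply PySem.Dict.ext
      rw [PySem.Dict.items_insert_of_contains _ _ hc]
      simp only [pvGroup, List.map_map, List.map_append, List.map_cons, List.map_nil]
      rw [pvOfListSnoc, if_pos hmem]
      apply List.map_congr_left
      intro a ha
      by_cases hat : a = f t
      · subst hat
        simp [List.filter_append]
      · have hba : (a == f t) = false := by simp [hat]
        have hbf : (f t == a) = false := by simp [Ne.symm hat]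
        simp [Function.comp, hba, List.filter_append, hbf]
    · -- new author: the loop appends a fresh entry at the end
      have hc : (PySem.Dict.mk (pvGroup f l)).contains (f t) = false := by
        rw [← Bool.not_eq_true]
        exact fun h => hmem ((pvContainsGroup f l (f t)).1 h)
      rw [hc]
      simp only [if_true]
      apply PySem.Dict.ext
      rw [PySem.Dict.items_insert_of_not_contains _ _ hc]
      simp only [pvGroup, List.map_append, List.map_cons, List.map_nil]
      rw [pvOfListSnoc, if_neg hmem]
      rw [List.map_append]
      congr 1
      · apply List.map_congr_left
        intro a ha
        have ha' : a ∈ l.map f := (PySem.Set.mem_ofList _ _).1 ha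
        have hne : f t ≠ a := fun h => hmem (h ▸ ha')
        have hbf : (f t == a) = false := by simp [hne]
        simp [List.filter_append, hbf]
      · have hnil : l.filter (fun t' => f t' == f t) = [] := by
          rw [List.filter_eq_nil_iff]
          intro t' ht' h
          have : f t' = f t := by simpa using h
          exact hmem (this ▸ List.mem_map_of_mem ht')
        simp [List.filter_append, hnil]

-- ===== VERDICT (by name: the statement is the Claim_ definition above) =====
theorem key_by_author_spec : Claim_equal_key_by_author := by
  intro articles info _ _
  unfold Spec_key_by_author key_by_author key_by_author_alt
  by_cases h : info = []
  · simp [h]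
  · simp only [h, if_false]
    rw [pvFoldlGroup (pvAuthor info) articles]
    simp only [pvGroup, PySem.List.dedup_eq_ofList]
    apply List.map_congr_left
    intro a _
    rw [pvZipFilter]
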